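-- pv_equiv track=rewrite | github.com/esauvisky/EmiNence | eminence.py | _has_consonant_cluster
-- ===== SOURCE A (Python) =====
-- def _has_consonant_cluster(text: str) -> bool:
--     """Check for unlikely consonant clusters (indicates random data)"""
--     consonants = 'bcdfghjklmnpqrstvwxyz'
--     consonant_run = 0
--
--     for char in text.lower():
--         if char in consonants:
--             consonant_run += 1
--             if consonant_run >= 5:  # 5+ consonants in a row is unusual
--                 return True
--         else:
--             consonant_run = 0
--
--     return False
-- ===== SOURCE B (Python) =====
-- def _has_consonant_cluster(text: str) -> bool:
--     """Check for unlikely consonant clusters (indicates random data)"""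
--     consonants = set('bcdfghjklmnpqrstvwxyz')
--     t = text.lower()
--     return any(all(c in consonants for c in t[i:i + 5]) for i in range(len(t) - 4))
-- ===== Notes on version B (the rewrite author's own statement) =====
-- stated objective: alternative
-- what changed: Replaced the streaming run-counter with an early-return branch by an existential sliding-window scan: any start position whose 5-character slice is all consonants.
import Mathlib
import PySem

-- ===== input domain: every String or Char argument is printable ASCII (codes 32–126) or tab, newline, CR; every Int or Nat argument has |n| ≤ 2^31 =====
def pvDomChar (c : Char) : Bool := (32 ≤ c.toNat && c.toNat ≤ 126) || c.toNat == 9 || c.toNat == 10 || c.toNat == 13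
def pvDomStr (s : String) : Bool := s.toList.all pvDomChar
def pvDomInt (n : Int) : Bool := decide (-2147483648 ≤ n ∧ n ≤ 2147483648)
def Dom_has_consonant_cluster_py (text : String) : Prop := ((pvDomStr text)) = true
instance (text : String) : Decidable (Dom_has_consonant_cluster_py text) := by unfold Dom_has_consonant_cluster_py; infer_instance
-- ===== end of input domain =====

-- B replaces A's streaming run-counter (with early return and else-reset) by an
-- existential sliding-window scan (any 5-char window all consonants); objective: alternative.

-- the consonant class, identical in both sources
def consChars : List Char := "bcdfghjklmnpqrstvwxyz".toList

-- ===== PORT A =====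
-- the for-loop with counter state and early 'return True'
def aLoop : List Char → Nat → Bool
  | [], _ => false
  | c :: cs, run =>
    if consChars.contains c then
      if run + 1 ≥ 5 then true else aLoop cs (run + 1)
    else
      aLoop cs 0

def has_consonant_cluster_py (text : String) : Bool :=
  aLoop (PySem.Str.lower text).toList 0

-- ===== PORT B =====
def has_consonant_cluster_py_alt (text : String) : Bool :=
  let t := (PySem.Str.lower text).toList
  let consonants := PySem.Set.ofList consChars
  (PySem.List.pyRange 0 ((t.length : Int) - 4) 1).any
    (fun i => (PySem.List.slice t (some i) (some (i + 5))).all (fun c => consonants.contains c))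

-- ===== PRECONDITION & SPEC =====
def Spec_has_consonant_cluster_py (text : String) (out : Bool) : Prop := out = has_consonant_cluster_py_alt text
instance (text : String) (out : Bool) : Decidable (Spec_has_consonant_cluster_py text out) := by unfold Spec_has_consonant_cluster_py; infer_instance

-- ===== CLAIM (what is proved, stated in full; the proofs are below) =====
def Claim_equal_has_consonant_cluster_py : Prop := ∀ (text : String), Dom_has_consonant_cluster_py text → Spec_has_consonant_cluster_py text (has_consonant_cluster_py text)

-- ===== LEMMAS AND PROOFS =====

-- proof-side helpers
def isCons (c : Char) : Bool := consChars.contains c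

-- per-start-position scan: true iff some suffix starts with 5 consonants
def bScan : List Char → Bool
  | [] => false
  | c :: cs => (decide (5 ≤ (c :: cs).length) && ((c :: cs).take 5).all isCons) || bScan cs

def anyWindow (l : List Char) : Bool :=
  (List.range (l.length - 4)).any (fun i => ((l.drop i).take 5).all isCons)

theorem allCons_take_eq (n : Nat) (l : List Char) :
    (decide (n ≤ l.length) && (l.take n).all isCons) =
      decide (n ≤ (l.takeWhile isCons).length) := by
  induction n generalizing l with
  | zero => simp
  | succ n ih =>
    cases l with
    | nil => simp
    | cons c cs =>
      by_cases h : isCons c = true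
      · simp [List.takeWhile, h, ih cs]
      · simp [List.takeWhile, h]

theorem head5_imp_bScan (l : List Char)
    (h : (decide (5 ≤ l.length) && (l.take 5).all isCons) = true) : bScan l = true := by
  cases l with
  | nil => simp at h
  | cons c cs =>
    show ((decide (5 ≤ (c :: cs).length) && ((c :: cs).take 5).all isCons) || bScan cs) = true
    rw [h, Bool.true_or]

theorem aLoop_eq (l : List Char) :
    ∀ run, run ≤ 4 →
      aLoop l run = (decide (5 ≤ run + (l.takeWhile isCons).length) || bScan l) := by
  induction l with
  | nil =>
    intro run h
    simp [aLoop, bScan]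
    omega
  | cons c cs ih =>
    intro run h
    rw [show bScan (c :: cs)
          = ((decide (5 ≤ (c :: cs).length) && ((c :: cs).take 5).all isCons) || bScan cs)
        from rfl,
        allCons_take_eq]
    by_cases hc : isCons c = true
    · have hm : c ∈ consChars := by simpa [isCons] using hc
      have hP : List.takeWhile isCons (c :: cs) = c :: List.takeWhile isCons cs := by
        simp [List.takeWhile, hc]
      rw [show aLoop (c :: cs) run
            = (if run + 1 ≥ 5 then true else aLoop cs (run + 1)) from by
          simp [aLoop, hm], hP]
      by_cases h5 : run + 1 ≥ 5
      · simp [h5]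
        left
        omega
      · rw [if_neg h5, ih (run + 1) (by omega)]
        by_cases hb : bScan cs = true
        · simp [hb]
        · rw [Bool.not_eq_true] at hb
          rw [hb]
          simp only [Bool.or_false, List.length_cons]
          rw [Bool.eq_iff_iff]
          simp only [Bool.or_eq_true, decide_eq_true_iff]
          omega
    · rw [Bool.not_eq_true] at hc
      have hm : c ∉ consChars := by simpa [isCons] using hc
      have hP : List.takeWhile isCons (c :: cs) = [] := by simp [List.takeWhile, hc]
      rw [show aLoop (c :: cs) run = aLoop cs 0 from by simp [aLoop, hm],
          ih 0 (by omega), hP]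
      by_cases h5 : 5 ≤ (cs.takeWhile isCons).length
      · have hb : bScan cs = true :=
          head5_imp_bScan cs (by rw [allCons_take_eq]; exact decide_eq_true h5)
        simp [hb]
      · have e1 : decide (5 ≤ 0 + (cs.takeWhile isCons).length) = false := by
          simp; omega
        have e2 : decide (5 ≤ run + (List.length ([] : List Char))) = false := by
          simp; omega
        rw [e1, e2]
        simp

theorem bScan_eq_anyWindow (l : List Char) : bScan l = anyWindow l := by
  induction l with
  | nil => simp [bScan, anyWindow]
  | cons c cs ih =>
    by_cases h : 4 ≤ cs.length
    · have hlen : (c :: cs).length - 4 = (cs.length - 4) + 1 := by simp; omega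
      simp only [bScan, anyWindow, hlen, List.range_succ_eq_map, List.any_cons, List.any_map]
      rw [ih]
      simp only [anyWindow]
      simp [h, Function.comp_def]
    · have h1 : (c :: cs).length - 4 = 0 := by simp; omega
      have h2 : cs.length - 4 = 0 := by omega
      have h5 : decide (5 ≤ (c :: cs).length) = false := by simp; omega
      simp only [bScan, anyWindow, h1, h2, List.range_zero, List.any_nil] at ih ⊢
      rw [h5, Bool.false_and, Bool.false_or, ih]

theorem aLoop_zero (l : List Char) : aLoop l 0 = bScan l := by
  rw [aLoop_eq l 0 (by omega)]
  by_cases h : 5 ≤ (l.takeWhile isCons).length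
  · have hb : bScan l = true :=
      head5_imp_bScan l (by rw [allCons_take_eq]; exact decide_eq_true h)
    simp [hb]
  · have h0 : decide (5 ≤ 0 + (l.takeWhile isCons).length) = false := by simp; omega
    rw [h0, Bool.false_or]

theorem alt_eq_anyWindow (text : String) :
    has_consonant_cluster_py_alt text = anyWindow (PySem.Str.lower text).toList := by
  have hset : PySem.Set.ofList consChars = consChars :=
    PySem.Set.ofList_eq_self_of_nodup (xs := consChars) (by decide)
  unfold has_consonant_cluster_py_alt anyWindow
  simp only [hset, PySem.List.pyRange_one]
  have hlen : (((PySem.Str.lower text).toList.length : Int) - 4 - 0).toNat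
      = (PySem.Str.lower text).toList.length - 4 := by omega
  rw [hlen, List.any_map]
  apply PySem.List.any_congr_mem
  intro k _
  show (PySem.List.slice _ (some (0 + (k : Int))) (some (0 + (k : Int) + 5))).all _ = _
  rw [show ((0 : Int) + (k : Int)) = ((k : Nat) : Int) by ring,
      show (((k : Nat) : Int) + 5) = (((k : Nat) : Int) + ((5 : Nat) : Int)) by push_cast; ring,
      PySem.List.slice_natCast_add]
  rfl

-- ===== VERDICT (by name: the statement is the Claim_ definition above) =====
theorem has_consonant_cluster_py_spec : Claim_equal_has_consonant_cluster_py := by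
  intro text _
  unfold Spec_has_consonant_cluster_py has_consonant_cluster_py
  rw [aLoop_zero, bScan_eq_anyWindow, alt_eq_anyWindow]
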